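-- pv_equiv track=rewrite | github.com/QI1002/exampool | Cracking_the_Coding_Interview/20-5.py | findMinDistance
-- ===== SOURCE A (Python) =====
-- def findMinDistance(book, astr, bstr):
--
--     words = book.split()
--     apos = -1
--     bpos = -1
--     mindist = len(words)
--
--     for i in range(len(words)):
--         update = False
--         v = words[i].replace('.','').replace('\'','').replace(',','').replace(';','').lower()
--         words[i] = v
--
--         if (astr == words[i]):
--             apos = i
--             update = True
--         if (bstr == words[i]):
--             bpos = i
--             update = True
--
--         if (apos != -1 and bpos != -1 and update):
--             newdist = abs(apos - bpos)
--             if (newdist < mindist):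
--                 mindist = newdist
--
--     return mindist
-- ===== SOURCE B (Python) =====
-- def findMinDistance(book, astr, bstr):
--     words = [w.replace('.', '').replace("'", '').replace(',', '').replace(';', '').lower()
--              for w in book.split()]
--     apos = [i for i, w in enumerate(words) if w == astr]
--     bpos = [i for i, w in enumerate(words) if w == bstr]
--     best = len(words)
--     p = 0
--     q = 0
--     while p < len(apos) and q < len(bpos):
--         d = abs(apos[p] - bpos[q])
--         if d < best:
--             best = d
--         if apos[p] < bpos[q]:
--             p += 1
--         else:
--             q += 1
--     return best
-- ===== Notes on version B (the rewrite author's own statement) =====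
-- stated objective: alternative
-- what changed: Instead of one pass tracking last-seen positions and re-checking both words at every token, B builds the normalized word list and the two sorted index lists once, then runs a two-pointer merge over the index lists to find the minimum gap.
import Mathlib
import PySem

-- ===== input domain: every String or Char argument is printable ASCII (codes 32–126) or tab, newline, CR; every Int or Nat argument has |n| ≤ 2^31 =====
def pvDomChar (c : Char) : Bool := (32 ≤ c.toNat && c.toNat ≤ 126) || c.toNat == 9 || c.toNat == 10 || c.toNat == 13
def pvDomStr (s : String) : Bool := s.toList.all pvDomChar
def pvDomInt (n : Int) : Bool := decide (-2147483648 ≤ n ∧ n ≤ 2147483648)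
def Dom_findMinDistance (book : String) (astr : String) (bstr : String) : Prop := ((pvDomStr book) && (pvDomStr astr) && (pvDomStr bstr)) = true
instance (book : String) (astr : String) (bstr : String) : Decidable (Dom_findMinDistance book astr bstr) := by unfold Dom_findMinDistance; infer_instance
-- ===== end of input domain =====

-- B replaces A's single pass with last-seen-position bookkeeping by index-list
-- collection plus a two-pointer merge over the two sorted index lists (objective: alternative algorithm).

-- ===== PORT A =====
-- shared normalization: w.replace('.','').replace('\'','').replace(',','').replace(';','').lower()
def normWord (w : String) : String :=
  PySem.Str.lower (PySem.Str.replace (PySem.Str.replace (PySem.Str.replace (PySem.Str.replace w "." "") "'" "") "," "") ";" "")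

-- the for-loop of A, index-driven, with the mutated words list carried in the state
def loopA (astr bstr : String) (ws : List String) (i : Nat) (apos bpos mindist : Int) : Int :=
  if h : i < ws.length then
    let v := normWord (ws.getD i "")
    let ws' := ws.set i v
    let wi := ws'.getD i ""
    let update := false
    let p1 := if astr = wi then ((i : Int), true) else (apos, update)
    let p2 := if bstr = wi then ((i : Int), true) else (bpos, p1.2)
    let mindist' :=
      if p1.1 ≠ -1 ∧ p2.1 ≠ -1 ∧ p2.2 = true then
        (let newdist := |p1.1 - p2.1|
         if newdist < mindist then newdist else mindist)
      else mindist
    loopA astr bstr ws' (i + 1) p1.1 p2.1 mindist'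
  else mindist
termination_by ws.length - i
decreasing_by simp_all; omega

def findMinDistance (book : String) (astr : String) (bstr : String) : Int :=
  let words := PySem.Str.split₀ book
  loopA astr bstr words 0 (-1) (-1) (words.length : Int)

-- ===== PORT B =====
-- the while-loop of B: two-pointer merge over the two index lists
def tpLoop (best : Int) : List Int → List Int → Int
  | a :: as, b :: bs =>
      let d := |a - b|
      let best' := if d < best then d else best
      if a < b then tpLoop best' as (b :: bs) else tpLoop best' (a :: as) bs
  | _, _ => best
termination_by la lb => la.length + lb.length

def findMinDistance_alt (book : String) (astr : String) (bstr : String) : Int :=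
  let words := (PySem.Str.split₀ book).map normWord
  let apos := (PySem.List.enumerate words).filterMap (fun p => if p.2 = astr then some p.1 else none)
  let bpos := (PySem.List.enumerate words).filterMap (fun p => if p.2 = bstr then some p.1 else none)
  tpLoop (words.length : Int) apos bpos

-- ===== PRECONDITION & SPEC =====
def Spec_findMinDistance (book : String) (astr : String) (bstr : String) (out : Int) : Prop := out = findMinDistance_alt book astr bstr
instance (book : String) (astr : String) (bstr : String) (out : Int) : Decidable (Spec_findMinDistance book astr bstr out) := by unfold Spec_findMinDistance; infer_instance

-- ===== CLAIM (what is proved, stated in full; the proofs are below) =====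
def Claim_equal_findMinDistance : Prop := ∀ (book : String) (astr : String) (bstr : String), Dom_findMinDistance book astr bstr → Spec_findMinDistance book astr bstr (findMinDistance book astr bstr)

-- ===== LEMMAS AND PROOFS =====

-- running min over a list with a starting value
def mmin (m : Int) (l : List Int) : Int := l.foldl min m

-- all pairwise distances |x - y|
def pairs (la lb : List Int) : List Int := la.flatMap (fun x => lb.map (fun y => |x - y|))

-- occurrence indices of t in ws, counting from i
def idxs (t : String) : List String → Nat → List Int
  | [], _ => []
  | w :: ws, i => if w = t then (i : Int) :: idxs t ws (i + 1) else idxs t ws (i + 1)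

def optL (p : Int) : List Int := if p = -1 then [] else [p]

lemma mmin_le_self (m : Int) (l : List Int) : mmin m l ≤ m := by
  induction l generalizing m with
  | nil => simp [mmin]
  | cons x xs ih => exact le_trans (ih (min m x)) (min_le_left _ _)

lemma mmin_le_mem {x : Int} {l : List Int} (m : Int) (hx : x ∈ l) : mmin m l ≤ x := by
  induction l generalizing m with
  | nil => simp at hx
  | cons y ys ih =>
    rcases List.mem_cons.1 hx with h | h
    · subst h
      exact le_trans (mmin_le_self (min m x) ys) (min_le_right _ _)
    · exact ih _ h

lemma le_mmin {c m : Int} {l : List Int} (hm : c ≤ m) (hl : ∀ x ∈ l, c ≤ x) : c ≤ mmin m l := by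
  induction l generalizing m with
  | nil => simpa [mmin]
  | cons y ys ih =>
    exact ih (le_min hm (hl y List.mem_cons_self)) (fun x hx => hl x (List.mem_cons_of_mem _ hx))

lemma mmin_eq_self {m : Int} {l : List Int} (h : ∀ x ∈ l, m ≤ x) : mmin m l = m :=
  le_antisymm (mmin_le_self _ _) (le_mmin le_rfl h)

lemma mmin_append (m : Int) (l1 l2 : List Int) : mmin m (l1 ++ l2) = mmin (mmin m l1) l2 := by
  simp [mmin, List.foldl_append]

lemma mem_pairs {c : Int} {la lb : List Int} :
    c ∈ pairs la lb ↔ ∃ x ∈ la, ∃ y ∈ lb, c = |x - y| := by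
  simp [pairs, eq_comm]

lemma pairs_comm (m : Int) (la lb : List Int) : mmin m (pairs la lb) = mmin m (pairs lb la) := by
  apply le_antisymm
  · refine le_mmin (mmin_le_self _ _) (fun c hc => ?_)
    rcases mem_pairs.1 hc with ⟨x, hx, y, hy, rfl⟩
    have : |y - x| ∈ pairs la lb := mem_pairs.2 ⟨y, hy, x, hx, rfl⟩
    simpa [abs_sub_comm] using mmin_le_mem m this
  · refine le_mmin (mmin_le_self _ _) (fun c hc => ?_)
    rcases mem_pairs.1 hc with ⟨x, hx, y, hy, rfl⟩
    have : |y - x| ∈ pairs lb la := mem_pairs.2 ⟨y, hy, x, hx, rfl⟩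
    simpa [abs_sub_comm] using mmin_le_mem m this

lemma idxs_ge {t : String} {ws : List String} {i : Nat} {x : Int} (hx : x ∈ idxs t ws i) :
    (i : Int) ≤ x := by
  induction ws generalizing i with
  | nil => simp [idxs] at hx
  | cons w ws ih =>
    simp only [idxs] at hx
    split at hx
    · rcases List.mem_cons.1 hx with rfl | h
      · exact le_refl _
      · have := ih h; push_cast at this ⊢; omega
    · have := ih hx; push_cast at this ⊢; omega

lemma idxs_pairwise (t : String) (ws : List String) (i : Nat) :
    (idxs t ws i).Pairwise (· ≤ ·) := by
  induction ws generalizing i with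
  | nil => simp [idxs]
  | cons w ws ih =>
    simp only [idxs]
    split
    · exact List.Pairwise.cons (fun x hx => le_trans (by push_cast; omega) (idxs_ge hx)) (ih (i + 1))
    · exact ih (i + 1)

-- the B-side filterMap over enumerate IS idxs
lemma filterMap_enumerate_eq_idxs (t : String) (ws : List String) (i : Int) (hi : 0 ≤ i) :
    (PySem.List.enumerate ws i).filterMap (fun p => if p.2 = t then some p.1 else none)
      = idxs t ws i.toNat := by
  induction ws generalizing i with
  | nil => simp [idxs]
  | cons w ws ih =>
    rw [PySem.List.enumerate_cons]
    have h1 : (i + 1).toNat = i.toNat + 1 := by omega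
    by_cases hw : w = t
    · simp [hw, idxs, ih (i + 1) (by omega), h1, Int.toNat_of_nonneg hi]
    · simp [hw, idxs, ih (i + 1) (by omega), h1]

-- head of a row dominates the rest
lemma mmin_cons_dom (m d : Int) (l : List Int) (h : ∀ x ∈ l, d ≤ x) :
    mmin m (d :: l) = min m d := by
  apply le_antisymm
  · exact le_min (mmin_le_self _ _) (mmin_le_mem _ List.mem_cons_self)
  · refine le_mmin (min_le_left _ _) (fun x hx => ?_)
    rcases List.mem_cons.1 hx with rfl | hx
    · exact min_le_right _ _
    · exact le_trans (min_le_right _ _) (h x hx)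

lemma pairs_cons_left (a : Int) (as lb : List Int) :
    pairs (a :: as) lb = lb.map (fun y => |a - y|) ++ pairs as lb := rfl

-- two-pointer merge computes the min over all pairwise distances
lemma tpLoop_eq : ∀ (best : Int) (la lb : List Int),
    la.Pairwise (· ≤ ·) → lb.Pairwise (· ≤ ·) →
    tpLoop best la lb = mmin best (pairs la lb) := by
  intro best la lb
  induction best, la, lb using tpLoop.induct with
  | case3 best la lb h =>
    intro _ _
    cases la with
    | nil => simp [tpLoop, pairs, mmin]
    | cons a as =>
      cases lb with
      | nil =>
        have : pairs (a :: as) [] = [] := by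
          simp [pairs, List.flatMap_eq_nil_iff]
        simp [tpLoop, this, mmin]
      | cons b bs => exact (h a as b bs rfl rfl).elim
  | case1 best a as b bs d best' hlt ih =>
    intro ha hb
    rw [List.pairwise_cons] at ha
    have hbs := (List.pairwise_cons.1 hb).1
    have hd : d = |a - b| := rfl
    have hb' : best' = if d < best then d else best := rfl
    rw [tpLoop]
    simp only [← hd, ← hb', if_pos hlt]
    rw [ih ha.2 hb, pairs_cons_left, mmin_append]
    congr 1
    rw [List.map_cons]
    rw [mmin_cons_dom best |a - b| (bs.map (fun y => |a - y|)) (by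
      intro x hx
      rcases List.mem_map.1 hx with ⟨y, hy, rfl⟩
      have := hbs y hy
      rw [abs_of_nonpos (by omega), abs_of_nonpos (by omega)]; omega)]
    rw [hb', hd]
    rcases le_or_gt best |a - b| with h | h
    · rw [min_eq_left h, if_neg (by omega)]
    · rw [min_eq_right (le_of_lt h), if_pos h]
  | case2 best a as b bs d best' hlt ih =>
    intro ha hb
    have has := (List.pairwise_cons.1 ha).1
    rw [List.pairwise_cons] at hb
    have hd : d = |a - b| := rfl
    have hb' : best' = if d < best then d else best := rfl
    rw [tpLoop]
    simp only [← hd, ← hb', if_neg hlt]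
    rw [ih ha hb.2, pairs_comm best, pairs_comm _ (a :: as) bs, pairs_cons_left, mmin_append]
    congr 1
    rw [List.map_cons]
    rw [mmin_cons_dom best |b - a| (as.map (fun y => |b - y|)) (by
      intro x hx
      rcases List.mem_map.1 hx with ⟨y, hy, rfl⟩
      have := has y hy
      rw [abs_of_nonpos (by omega), abs_of_nonpos (by omega)]; omega)]
    rw [abs_sub_comm b a, hb', hd]
    rcases le_or_gt best |a - b| with h | h
    · rw [min_eq_left h, if_neg (by omega)]
    · rw [min_eq_right (le_of_lt h), if_pos h]

-- the structural version of A's loop, on the already-normalized suffix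
def loop2 (astr bstr : String) : List String → Nat → Int → Int → Int → Int
  | [], _, _, _, mindist => mindist
  | w :: ws, i, apos, bpos, mindist =>
    let update := false
    let p1 := if astr = w then ((i : Int), true) else (apos, update)
    let p2 := if bstr = w then ((i : Int), true) else (bpos, p1.2)
    let mindist' :=
      if p1.1 ≠ -1 ∧ p2.1 ≠ -1 ∧ p2.2 = true then
        (let newdist := |p1.1 - p2.1|
         if newdist < mindist then newdist else mindist)
      else mindist
    loop2 astr bstr ws (i + 1) p1.1 p2.1 mindist'

lemma loopA_eq_loop2 (astr bstr : String) : ∀ (n : Nat) (ws : List String) (i : Nat),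
    ws.length - i = n → ∀ (apos bpos mindist : Int),
    loopA astr bstr ws i apos bpos mindist
      = loop2 astr bstr ((ws.drop i).map normWord) i apos bpos mindist := by
  intro n
  induction n with
  | zero =>
    intro ws i h apos bpos mindist
    rw [loopA, dif_neg (by omega), List.drop_eq_nil_of_le (by omega), List.map_nil, loop2]
  | succ n ih =>
    intro ws i h apos bpos mindist
    rw [loopA]
    by_cases hlt : i < ws.length
    · rw [dif_pos hlt]
      have hget : ws.getD i "" = ws[i] := by
        simp [List.getD_eq_getElem?_getD, List.getElem?_eq_getElem hlt]
      simp only [hget]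
      have hset : (ws.set i (normWord ws[i])).getD i "" = normWord ws[i] := by
        simp [List.getD_eq_getElem?_getD, hlt]
      simp only [hset]
      rw [List.drop_eq_getElem_cons hlt, List.map_cons, loop2]
      rw [ih (ws.set i (normWord ws[i])) (i + 1) (by rw [List.length_set]; omega)]
      rw [List.drop_set, if_pos (by omega)]
    · exact absurd h (by omega)

-- main invariant: A's loop computes the min over all pairwise distances,
-- given that apos/bpos are the last occurrences so far and mindist already
-- undercuts their distance
lemma loop2_eq (astr bstr : String) : ∀ (ws : List String) (i : Nat) (apos bpos mindist : Int),
    (apos = -1 ∨ (0 ≤ apos ∧ apos < i)) →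
    (bpos = -1 ∨ (0 ≤ bpos ∧ bpos < i)) →
    (apos ≠ -1 → bpos ≠ -1 → mindist ≤ |apos - bpos|) →
    loop2 astr bstr ws i apos bpos mindist
      = mmin mindist (pairs (optL apos ++ idxs astr ws i) (optL bpos ++ idxs bstr ws i)) := by
  intro ws
  induction ws with
  | nil =>
    intro i apos bpos mindist hA hB hM
    rw [loop2]
    simp only [idxs, List.append_nil]
    by_cases ha : apos = -1
    · simp [optL, ha, pairs, mmin]
    · by_cases hb : bpos = -1
      · simp [optL, ha, hb, pairs, mmin]
      · simp only [optL, if_neg ha, if_neg hb, pairs, List.flatMap_cons, List.map_cons,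
          List.map_nil, List.flatMap_nil, List.append_nil]
        exact (mmin_eq_self (by intro x hx; simp at hx; subst hx; exact hM ha hb)).symm
  | cons w ws ih =>
    intro i apos bpos mindist hA hB hM
    have hioptA : optL ((i : Int)) = [(i : Int)] := by rw [optL, if_neg (by omega)]
    by_cases ha : astr = w <;> by_cases hb : bstr = w
    · -- both words match: apos = bpos = i, distance 0
      rw [loop2]
      simp only [if_pos ha, if_pos hb, idxs, if_pos ha.symm, if_pos hb.symm]
      have hcond : ((i : Int) ≠ -1 ∧ (i : Int) ≠ -1 ∧ True) := ⟨by omega, by omega, trivial⟩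
      rw [if_pos hcond]
      have h0 : |(i : Int) - (i : Int)| = 0 := by simp
      rw [h0]
      rw [ih (i + 1) (i : Int) (i : Int) _ (Or.inr ⟨by omega, by push_cast; omega⟩)
        (Or.inr ⟨by omega, by push_cast; omega⟩) (by intro _ _; rw [h0]; split <;> omega)]
      rw [hioptA]
      simp only [List.singleton_append]
      have hval : (if (0 : Int) < mindist then (0 : Int) else mindist) = min mindist 0 := by
        split <;> omega
      rw [hval]
      rw [mmin_eq_self (l := pairs ((i : Int) :: idxs astr ws (i + 1)) ((i : Int) :: idxs bstr ws (i + 1))) (by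
        intro x hx
        rcases mem_pairs.1 hx with ⟨u, _, v, _, rfl⟩
        exact le_trans (min_le_right _ _) (abs_nonneg _))]
      apply le_antisymm
      · refine le_mmin (min_le_left _ _) (fun x hx => ?_)
        rcases mem_pairs.1 hx with ⟨u, _, v, _, rfl⟩
        exact le_trans (min_le_right _ _) (abs_nonneg _)
      · refine le_min (mmin_le_self _ _) ?_
        have h00 : (0 : Int) ∈ pairs (optL apos ++ (i : Int) :: idxs astr ws (i + 1)) (optL bpos ++ (i : Int) :: idxs bstr ws (i + 1)) := by
          refine mem_pairs.2 ⟨(i : Int), ?_, (i : Int), ?_, by simp⟩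
          · exact List.mem_append_right _ List.mem_cons_self
          · exact List.mem_append_right _ List.mem_cons_self
        exact mmin_le_mem _ h00
    · -- only astr matches: apos becomes i
      rw [loop2]
      simp only [if_pos ha, if_neg hb, idxs, if_pos ha.symm, if_neg (fun h : w = bstr => hb h.symm)]
      have hval : (if (i : Int) ≠ -1 ∧ bpos ≠ -1 ∧ True then
            (if |(i : Int) - bpos| < mindist then |(i : Int) - bpos| else mindist) else mindist)
          = if bpos = -1 then mindist else min mindist |(i : Int) - bpos| := by
        by_cases h : bpos = -1
        · rw [if_neg (by simp [h]), if_pos h]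
        · rw [if_pos ⟨by omega, h, trivial⟩, if_neg h]
          split <;> omega
      rw [hval]
      set m' := if bpos = -1 then mindist else min mindist |(i : Int) - bpos| with hm'
      rw [ih (i + 1) (i : Int) bpos m' (Or.inr ⟨by omega, by push_cast; omega⟩)
        (by rcases hB with h | h; exact Or.inl h; exact Or.inr ⟨h.1, by push_cast; omega⟩)
        (by intro _ h; rw [hm', if_neg h]; exact min_le_right _ _)]
      rw [hioptA]
      simp only [List.singleton_append]
      have hm'le : m' ≤ mindist := by rw [hm']; split; exact le_rfl; exact min_le_left _ _
      apply le_antisymm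
      · -- the new min undercuts every pair of the fuller lists
        refine le_mmin (le_trans (mmin_le_self _ _) hm'le) (fun c hc => ?_)
        rcases mem_pairs.1 hc with ⟨x, hx, y, hy, rfl⟩
        rcases List.mem_append.1 hx with hx | hx
        · have hap : apos ≠ -1 := by intro h; simp [optL, h] at hx
          have hxa : x = apos := by simpa [optL, hap] using hx
          subst hxa
          rcases List.mem_append.1 hy with hy | hy
          · have hbp : bpos ≠ -1 := by intro h; simp [optL, h] at hy
            have hyb : y = bpos := by simpa [optL, hbp] using hy
            subst hyb
            exact le_trans (mmin_le_self _ _) (le_trans hm'le (hM hap hbp))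
          · -- y a future b-index: the pair (i, y) is at least as close
            have hyi : (((i + 1 : Nat)) : Int) ≤ y := idxs_ge hy
            push_cast at hyi
            have hxi : x < (i : Int) := by rcases hA with h | h; exact absurd h hap; exact h.2
            have hx0 : 0 ≤ x := by rcases hA with h | h; exact absurd h hap; exact h.1
            have hdom : |(i : Int) - y| ≤ |x - y| := by
              rw [abs_of_nonpos (by omega), abs_of_nonpos (by omega)]; omega
            exact le_trans (mmin_le_mem _ (mem_pairs.2 ⟨(i : Int), List.mem_cons_self, y,
              List.mem_append_right _ hy, rfl⟩)) hdom
        · exact mmin_le_mem _ (mem_pairs.2 ⟨x, hx, y, hy, rfl⟩)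
      · refine le_mmin ?_ (fun c hc => ?_)
        · rw [hm']
          split
          · exact mmin_le_self _ _
          · rename_i h
            exact le_min (mmin_le_self _ _) (mmin_le_mem _ (mem_pairs.2 ⟨(i : Int),
              List.mem_append_right _ List.mem_cons_self, bpos,
              List.mem_append_left _ (by simp [optL, h]), rfl⟩))
        · rcases mem_pairs.1 hc with ⟨x, hx, y, hy, rfl⟩
          exact mmin_le_mem _ (mem_pairs.2 ⟨x, List.mem_append_right _ hx, y, hy, rfl⟩)
    · -- only bstr matches: bpos becomes i
      rw [loop2]
      simp only [if_neg ha, if_pos hb, idxs, if_neg (fun h : w = astr => ha h.symm), if_pos hb.symm]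
      have hval : (if apos ≠ -1 ∧ (i : Int) ≠ -1 ∧ True then
            (if |apos - (i : Int)| < mindist then |apos - (i : Int)| else mindist) else mindist)
          = if apos = -1 then mindist else min mindist |apos - (i : Int)| := by
        by_cases h : apos = -1
        · rw [if_neg (by simp [h]), if_pos h]
        · rw [if_pos ⟨h, by omega, trivial⟩, if_neg h]
          split <;> omega
      rw [hval]
      set m' := if apos = -1 then mindist else min mindist |apos - (i : Int)| with hm'
      rw [ih (i + 1) apos (i : Int) m'
        (by rcases hA with h | h; exact Or.inl h; exact Or.inr ⟨h.1, by push_cast; omega⟩)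
        (Or.inr ⟨by omega, by push_cast; omega⟩)
        (by intro h _; rw [hm', if_neg h]; exact min_le_right _ _)]
      rw [hioptA]
      simp only [List.singleton_append]
      have hm'le : m' ≤ mindist := by rw [hm']; split; exact le_rfl; exact min_le_left _ _
      apply le_antisymm
      · refine le_mmin (le_trans (mmin_le_self _ _) hm'le) (fun c hc => ?_)
        rcases mem_pairs.1 hc with ⟨x, hx, y, hy, rfl⟩
        rcases List.mem_append.1 hy with hy | hy
        · have hbp : bpos ≠ -1 := by intro h; simp [optL, h] at hy
          have hyb : y = bpos := by simpa [optL, hbp] using hy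
          subst hyb
          rcases List.mem_append.1 hx with hx | hx
          · have hap : apos ≠ -1 := by intro h; simp [optL, h] at hx
            have hxa : x = apos := by simpa [optL, hap] using hx
            subst hxa
            exact le_trans (mmin_le_self _ _) (le_trans hm'le (hM hap hbp))
          · -- x a future a-index: the pair (x, i) is at least as close
            have hxi : (((i + 1 : Nat)) : Int) ≤ x := idxs_ge hx
            push_cast at hxi
            have hyi : y < (i : Int) := by rcases hB with h | h; exact absurd h hbp; exact h.2
            have hy0 : 0 ≤ y := by rcases hB with h | h; exact absurd h hbp; exact h.1
            have hdom : |x - (i : Int)| ≤ |x - y| := by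
              rw [abs_of_nonneg (by omega), abs_of_nonneg (by omega)]; omega
            exact le_trans (mmin_le_mem _ (mem_pairs.2 ⟨x, List.mem_append_right _ hx, (i : Int),
              List.mem_cons_self, rfl⟩)) hdom
        · exact mmin_le_mem _ (mem_pairs.2 ⟨x, hx, y, hy, rfl⟩)
      · refine le_mmin ?_ (fun c hc => ?_)
        · rw [hm']
          split
          · exact mmin_le_self _ _
          · rename_i h
            exact le_min (mmin_le_self _ _) (mmin_le_mem _ (mem_pairs.2 ⟨apos,
              List.mem_append_left _ (by simp [optL, h]), (i : Int),
              List.mem_append_right _ List.mem_cons_self, rfl⟩))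
        · rcases mem_pairs.1 hc with ⟨x, hx, y, hy, rfl⟩
          exact mmin_le_mem _ (mem_pairs.2 ⟨x, hx, y, List.mem_append_right _ hy, rfl⟩)
    · -- neither matches
      rw [loop2]
      simp only [if_neg ha, if_neg hb, idxs, if_neg (fun h : w = astr => ha h.symm), if_neg (fun h : w = bstr => hb h.symm)]
      rw [if_neg (by simp)]
      exact ih (i + 1) apos bpos mindist
        (by rcases hA with h | h; exact Or.inl h; exact Or.inr ⟨h.1, by push_cast; omega⟩)
        (by rcases hB with h | h; exact Or.inl h; exact Or.inr ⟨h.1, by push_cast; omega⟩)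
        hM

-- ===== VERDICT (by name: the statement is the Claim_ definition above) =====
theorem findMinDistance_spec : Claim_equal_findMinDistance := by
  intro book astr bstr _
  unfold Spec_findMinDistance findMinDistance findMinDistance_alt
  simp only []
  set ws0 := PySem.Str.split₀ book with hws0
  set nws := ws0.map normWord with hnws
  have hlen : nws.length = ws0.length := by simp [hnws]
  rw [loopA_eq_loop2 astr bstr ws0.length ws0 0 (by omega)]
  rw [List.drop_zero, ← hnws]
  rw [loop2_eq astr bstr nws 0 (-1) (-1) _ (Or.inl rfl) (Or.inl rfl) (by intro h; simp at h)]
  rw [filterMap_enumerate_eq_idxs astr nws 0 le_rfl, filterMap_enumerate_eq_idxs bstr nws 0 le_rfl]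
  simp only [Int.toNat_zero]
  rw [tpLoop_eq _ _ _ (idxs_pairwise astr nws 0) (idxs_pairwise bstr nws 0)]
  simp [optL, hlen]
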